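-- pv_equiv track=rewrite | github.com/luisjo81/CE4301-ProyectoGrupal1 | PythonFiles/Compilador.py | checkOperationType
-- ===== SOURCE A (Python) =====
-- arithmeticOpList = ['NOP', 'ADD', 'ADDI', 'SUB', 'SUBI', 'MULI', 'DIV', 'MOV', 'MOVI', 'LNUM', 'ADDV', 'ADDIV', 'SUBV', 'SUBIV', 'MULIV', 'DIVV', 'MOVV', 'MOVIV', 'LNUMV']
--
-- logicOpList = ['AND', 'ANDI', 'OR', 'ORI', 'XOR', 'NOT', 'ANDV', 'ANDIV', 'ORV', 'ORIV', 'XORV', 'NOTV']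
--
-- memoryOpList = ['LDR', 'STR', 'LDV', 'STV']
--
-- jumpOpList = ['JMP', 'JEQ', 'JNEQ', 'JGT', 'JGE', 'JLT', 'JLE']
--
-- def checkOperationType(word):
--     for a in arithmeticOpList:
--         if a == word:
--             return 1
--     for l in logicOpList:
--         if l == word:
--             return 2
--     for m in memoryOpList:
--         if m == word:
--             return 3
--     for j in jumpOpList:
--         if j == word:
--             return 4
--     return 5
-- ===== SOURCE B (Python) =====
-- arithmeticOpList = ['NOP', 'ADD', 'ADDI', 'SUB', 'SUBI', 'MULI', 'DIV', 'MOV', 'MOVI', 'LNUM', 'ADDV', 'ADDIV', 'SUBV', 'SUBIV', 'MULIV', 'DIVV', 'MOVV', 'MOVIV', 'LNUMV']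
-- logicOpList = ['AND', 'ANDI', 'OR', 'ORI', 'XOR', 'NOT', 'ANDV', 'ANDIV', 'ORV', 'ORIV', 'XORV', 'NOTV']
-- memoryOpList = ['LDR', 'STR', 'LDV', 'STV']
-- jumpOpList = ['JMP', 'JEQ', 'JNEQ', 'JGT', 'JGE', 'JLT', 'JLE']
--
-- # one sorted (opcode, category) table built once; lookups binary-search it
-- _table = sorted(((op, n)
--                 for n, ops in enumerate([arithmeticOpList, logicOpList,
--                                          memoryOpList, jumpOpList], 1)
--                 for op in ops), key=lambda p: p[0])
--
-- def checkOperationType(word):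
--     lo, hi = 0, len(_table)
--     while lo < hi:
--         mid = (lo + hi) // 2
--         key, cat = _table[mid]
--         if key == word:
--             return cat
--         if key < word:
--             lo = mid + 1
--         else:
--             hi = mid
--     return 5
-- ===== Notes on version B (the rewrite author's own statement) =====
-- stated objective: alternative
-- what changed: Replaces A's four sequential linear membership scans with binary search over a single (opcode, category) table sorted by opcode and built once; disjoint opcode sets make the table's lookup unambiguous and falling out of the search returns 5.
import Mathlib
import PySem

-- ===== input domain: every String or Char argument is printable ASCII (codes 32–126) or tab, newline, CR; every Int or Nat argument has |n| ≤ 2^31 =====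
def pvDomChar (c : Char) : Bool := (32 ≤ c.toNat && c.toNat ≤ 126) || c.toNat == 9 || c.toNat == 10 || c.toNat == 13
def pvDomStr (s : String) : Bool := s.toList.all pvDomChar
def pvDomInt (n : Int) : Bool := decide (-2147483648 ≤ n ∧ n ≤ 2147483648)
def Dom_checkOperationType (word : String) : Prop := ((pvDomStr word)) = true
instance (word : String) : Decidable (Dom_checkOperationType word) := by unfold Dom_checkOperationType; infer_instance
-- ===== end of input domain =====

-- B replaces A's four sequential linear membership scans by binary search over one
-- (opcode, category) table sorted by opcode, built once (alternative algorithm).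

-- ===== PORT A =====
def arithmeticOpList : List String := ["NOP", "ADD", "ADDI", "SUB", "SUBI", "MULI", "DIV", "MOV", "MOVI", "LNUM", "ADDV", "ADDIV", "SUBV", "SUBIV", "MULIV", "DIVV", "MOVV", "MOVIV", "LNUMV"]
def logicOpList : List String := ["AND", "ANDI", "OR", "ORI", "XOR", "NOT", "ANDV", "ANDIV", "ORV", "ORIV", "XORV", "NOTV"]
def memoryOpList : List String := ["LDR", "STR", "LDV", "STV"]
def jumpOpList : List String := ["JMP", "JEQ", "JNEQ", "JGT", "JGE", "JLT", "JLE"]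

-- one Python 'for x in l: if x == word: return r' loop: first match returns r, falling off returns none
def scanLoop (l : List String) (word : String) (r : Int) : Option Int :=
  match l with
  | [] => none
  | a :: rest => if a == word then some r else scanLoop rest word r

def checkOperationType (word : String) : Int :=
  match scanLoop arithmeticOpList word 1 with
  | some v => v
  | none =>
    match scanLoop logicOpList word 2 with
    | some v => v
    | none =>
      match scanLoop memoryOpList word 3 with
      | some v => v
      | none =>
        match scanLoop jumpOpList word 4 with
        | some v => v
        | none => 5

-- ===== PORT B =====
-- the generator expression: for n, ops in enumerate([...], 1) for op in ops → (op, n) pairs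
def opPairs : List (String × Int) :=
  (([(arithmeticOpList, (1 : Int)), (logicOpList, 2), (memoryOpList, 3), (jumpOpList, 4)]).flatMap
    (fun p => p.1.map (fun op => (op, p.2))))

-- _table = sorted(pairs, key=lambda p: p[0]), built once
def opTable : List (String × Int) := PySem.List.sorted opPairs (fun p => p.1) false

-- the while loop: lo, hi narrow by halving; t[mid] is always in range (lo < hi ≤ len t
-- at every call), so the 'none' arm merely totalizes the same computation
def bsearch (t : List (String × Int)) (word : String) (lo hi : Nat) : Int :=
  if _h : lo < hi then
    let mid := (lo + hi) / 2
    match t[mid]? with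
    | none => 5
    | some (key, cat) =>
      if key = word then cat
      else if key < word then bsearch t word (mid + 1) hi
      else bsearch t word lo mid
  else 5
termination_by hi - lo
decreasing_by all_goals omega

def checkOperationType_alt (word : String) : Int :=
  bsearch opTable word 0 opTable.length

-- ===== PRECONDITION & SPEC =====
def Spec_checkOperationType (word : String) (out : Int) : Prop := out = checkOperationType_alt word
instance (word : String) (out : Int) : Decidable (Spec_checkOperationType word out) := by unfold Spec_checkOperationType; infer_instance

-- ===== CLAIM (what is proved, stated in full; the proofs are below) =====
def Claim_equal_checkOperationType : Prop := ∀ (word : String), Dom_checkOperationType word → Spec_checkOperationType word (checkOperationType word)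

-- ===== LEMMAS AND PROOFS =====

-- first-match association lookup (the common characterisation both programs are reduced to)
def lookup? (l : List (String × Int)) (word : String) : Option Int :=
  match l with
  | [] => none
  | (k, v) :: rest => if k == word then some v else lookup? rest word

-- the sorted table, as a literal
def tableLit : List (String × Int) :=
  [("ADD", 1), ("ADDI", 1), ("ADDIV", 1), ("ADDV", 1), ("AND", 2), ("ANDI", 2),
   ("ANDIV", 2), ("ANDV", 2), ("DIV", 1), ("DIVV", 1), ("JEQ", 4), ("JGE", 4),
   ("JGT", 4), ("JLE", 4), ("JLT", 4), ("JMP", 4), ("JNEQ", 4), ("LDR", 3),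
   ("LDV", 3), ("LNUM", 1), ("LNUMV", 1), ("MOV", 1), ("MOVI", 1), ("MOVIV", 1),
   ("MOVV", 1), ("MULI", 1), ("MULIV", 1), ("NOP", 1), ("NOT", 2), ("NOTV", 2),
   ("OR", 2), ("ORI", 2), ("ORIV", 2), ("ORV", 2), ("STR", 3), ("STV", 3),
   ("SUB", 1), ("SUBI", 1), ("SUBIV", 1), ("SUBV", 1), ("XOR", 2), ("XORV", 2)]

set_option maxRecDepth 16000 in
theorem tableLit_perm : tableLit.Perm opPairs := by decide

set_option maxRecDepth 16000 in
theorem tableLit_sorted_toList : tableLit.Pairwise (fun p q => p.1.toList < q.1.toList) := by decide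

theorem tableLit_sorted : tableLit.Pairwise (fun p q => p.1 < q.1) :=
  tableLit_sorted_toList.imp (fun h => String.lt_iff_toList_lt.mpr h)

theorem opTable_eq : opTable = tableLit :=
  PySem.List.sorted_eq_of_perm_of_pairwise_lt opPairs tableLit (fun p => p.1)
    tableLit_perm tableLit_sorted

set_option maxRecDepth 16000 in
theorem opPairs_keys_nodup : (opPairs.map Prod.fst).Nodup := by decide

-- A's four scans over disjoint blocks = lookup in the concatenated pair list
theorem lookup?_block (l : List String) (r : Int) (rest : List (String × Int)) (word : String) :
    lookup? (l.map (fun op => (op, r)) ++ rest) word =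
      (match scanLoop l word r with
       | some v => some v
       | none => lookup? rest word) := by
  induction l with
  | nil => simp [scanLoop]
  | cons a tl ih =>
      simp only [List.map, List.cons_append, lookup?, scanLoop]
      by_cases h : a == word
      · simp [h]
      · simp [h, ih]

theorem lookup?_opPairs (word : String) :
    lookup? opPairs word =
      (match scanLoop arithmeticOpList word 1 with
       | some v => some v
       | none =>
         match scanLoop logicOpList word 2 with
         | some v => some v
         | none =>
           match scanLoop memoryOpList word 3 with
           | some v => some v
           | none => scanLoop jumpOpList word 4) := by
  unfold opPairs
  simp only [List.flatMap_cons, List.flatMap_nil, List.append_nil]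
  rw [lookup?_block, lookup?_block, lookup?_block,
    (List.append_nil (jumpOpList.map (fun op => (op, (4 : Int))))).symm, lookup?_block]
  cases scanLoop arithmeticOpList word 1 <;>
    cases scanLoop logicOpList word 2 <;>
      cases scanLoop memoryOpList word 3 <;>
        cases scanLoop jumpOpList word 4 <;> rfl

theorem checkOperationType_eq_lookup (word : String) :
    checkOperationType word = (lookup? opPairs word).getD 5 := by
  unfold checkOperationType
  rw [lookup?_opPairs]
  cases scanLoop arithmeticOpList word 1 <;>
    cases scanLoop logicOpList word 2 <;>
      cases scanLoop memoryOpList word 3 <;>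
        cases scanLoop jumpOpList word 4 <;> rfl

-- lookup in an association list with distinct keys is invariant under permutation
theorem lookup?_perm {l1 l2 : List (String × Int)} (h : l1.Perm l2)
    (hn : (l1.map Prod.fst).Nodup) (word : String) :
    lookup? l1 word = lookup? l2 word := by
  induction h with
  | nil => rfl
  | cons x h ih =>
      simp only [List.map_cons, List.nodup_cons] at hn
      obtain ⟨x1, x2⟩ := x
      simp only [lookup?]
      rw [ih hn.2]
  | swap x y l =>
      obtain ⟨x1, x2⟩ := x
      obtain ⟨y1, y2⟩ := y
      simp only [List.map_cons, List.nodup_cons, List.mem_cons, not_or] at hn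
      have hne : y1 ≠ x1 := hn.1.1
      simp only [lookup?]
      by_cases hx : x1 == word
      · by_cases hy : y1 == word
        · exact absurd (by rw [eq_of_beq hy, eq_of_beq hx]) hne
        · simp [hx, hy]
      · by_cases hy : y1 == word <;> simp [hx, hy]
  | trans h1 _ ih1 ih2 =>
      rw [ih1 hn, ih2 ((h1.map Prod.fst).nodup_iff.mp hn)]

theorem lookup?_eq_none_of_forall {t : List (String × Int)} {word : String}
    (h : ∀ p ∈ t, p.1 ≠ word) : lookup? t word = none := by
  induction t with
  | nil => rfl
  | cons a tl ih =>
      simp only [lookup?]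
      have ha : ¬ (a.1 == word) = true := by
        simpa using h a (by simp)
      simp only [ha, Bool.false_eq_true]
      exact ih (fun p hp => h p (by simp [hp]))

theorem lookup?_of_mem {t : List (String × Int)} {word : String} {v : Int}
    (hp : t.Pairwise (fun p q => p.1 < q.1)) (hm : (word, v) ∈ t) :
    lookup? t word = some v := by
  induction t with
  | nil => cases hm
  | cons a tl ih =>
      simp only [List.pairwise_cons] at hp
      simp only [List.mem_cons] at hm
      simp only [lookup?]
      rcases hm with hm | hm
      · subst hm; simp
      · have hne : a.1 ≠ word := by
          have := hp.1 _ hm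
          simp only at this
          exact ne_of_lt this
        simp only [beq_iff_eq, hne]
        exact ih hp.2 hm

-- key monotonicity of a strictly sorted table
theorem key_mono {t : List (String × Int)} (hp : t.Pairwise (fun p q => p.1 < q.1))
    {i j : Nat} (hij : i < j) (hj : j < t.length) :
    (t[i]'(lt_trans hij hj)).1 < (t[j]'hj).1 :=
  (List.pairwise_iff_getElem.mp hp) i j (lt_trans hij hj) hj hij

-- binary search on a strictly key-sorted table computes the association lookup
theorem bsearch_eq (t : List (String × Int)) (hp : t.Pairwise (fun p q => p.1 < q.1))
    (word : String) (lo hi : Nat) (hhi : hi ≤ t.length)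
    (hlo : ∀ i, i < lo → (hi' : i < t.length) → (t[i]'hi').1 ≠ word)
    (hup : ∀ i, hi ≤ i → (hi' : i < t.length) → (t[i]'hi').1 ≠ word) :
    bsearch t word lo hi = (lookup? t word).getD 5 := by
  fun_induction bsearch t word lo hi with
  | case1 lo hi h mid hnone =>
      -- t[mid]? = none is impossible: mid < hi ≤ t.length
      exfalso
      have hm : mid < t.length := lt_of_lt_of_le (by omega) hhi
      simp [List.getElem?_eq_getElem hm] at hnone
  | case2 lo hi h mid cat hsome =>
      have hm : mid < t.length := lt_of_lt_of_le (by omega) hhi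
      rw [List.getElem?_eq_getElem hm] at hsome
      have hmem : (word, cat) ∈ t := by
        have e : t[mid]'hm = (word, cat) := by injection hsome
        exact e ▸ List.getElem_mem hm
      rw [lookup?_of_mem hp hmem]; rfl
  | case3 lo hi h mid key cat hsome hne hlt ih =>
      have hm : mid < t.length := lt_of_lt_of_le (by omega) hhi
      rw [List.getElem?_eq_getElem hm] at hsome
      have hkey : (t[mid]'hm).1 = key := by injection hsome with e; rw [e]
      refine ih hhi ?_ hup
      intro i hilt hi'
      rcases Nat.lt_or_ge i mid with hc | hc
      · intro hcontra
        have := key_mono hp hc hm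
        rw [hcontra, hkey] at this
        exact absurd (lt_trans this hlt) (lt_irrefl word)
      · have : i = mid := by omega
        subst this
        rw [hkey]
        exact fun e => absurd (e ▸ hlt) (lt_irrefl word)
  | case4 lo hi h mid key cat hsome hne hnlt ih =>
      have hm : mid < t.length := lt_of_lt_of_le (by omega) hhi
      rw [List.getElem?_eq_getElem hm] at hsome
      have hkey : (t[mid]'hm).1 = key := by injection hsome with e; rw [e]
      have hwlt : word < key := lt_of_le_of_ne (not_lt.mp hnlt) (Ne.symm hne)
      refine ih (le_trans (by omega) hhi) hlo ?_
      intro i hge hi'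
      rcases Nat.lt_or_ge mid i with hc | hc
      · intro hcontra
        have := key_mono hp hc hi'
        rw [hcontra, hkey] at this
        exact absurd (lt_trans hwlt this) (lt_irrefl word)
      · have : i = mid := by omega
        subst this
        rw [hkey]
        exact fun e => absurd (e ▸ hwlt) (lt_irrefl word)
  | case5 lo hi h =>
      rw [lookup?_eq_none_of_forall ?_]
      · rfl
      · intro p hpm
        obtain ⟨i, hi', hpe⟩ := List.getElem_of_mem hpm
        subst hpe
        rcases Nat.lt_or_ge i lo with hc | hc
        · exact hlo i hc hi'
        · exact hup i (by omega) hi'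

-- ===== VERDICT (by name: the statement is the Claim_ definition above) =====
theorem checkOperationType_spec : Claim_equal_checkOperationType := by
  intro word _
  unfold Spec_checkOperationType checkOperationType_alt
  rw [checkOperationType_eq_lookup, opTable_eq,
    bsearch_eq tableLit tableLit_sorted word 0 tableLit.length (le_refl _)
      (fun i hi _ => absurd hi (Nat.not_lt_zero i))
      (fun i hge hi' => absurd hi' (not_lt.mpr hge)),
    lookup?_perm tableLit_perm.symm opPairs_keys_nodup word]
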